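-- pv_equiv track=rewrite | github.com/wbth/scapper | rev/jp.py | translate_date_to_english
-- ===== SOURCE A (Python) =====
-- def translate_date_to_english(date_str):
--     days = {
--         'Senin': 'Monday',
--         'Selasa': 'Tuesday',
--         'Rabu': 'Wednesday',
--         'Kamis': 'Thursday',
--         'Jumat': 'Friday',
--         'Sabtu': 'Saturday',
--         'Minggu': 'Sunday'
--     }
--
--     months = {
--         'Januari': 'January',
--         'Februari': 'February',
--         'Maret': 'March',
--         'April': 'April',
--         'Mei': 'May',
--         'Juni': 'June',
--         'Juli': 'July',
--         'Agustus': 'August',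
--         'September': 'September',
--         'Oktober': 'October',
--         'November': 'November',
--         'Desember': 'December'
--     }
--
--     for indo, eng in days.items():
--         date_str = date_str.replace(indo, eng)
--
--     for indo, eng in months.items():
--         date_str = date_str.replace(indo, eng)
--
--     return date_str
-- ===== SOURCE B (Python) =====
-- def translate_date_to_english(date_str):
--     # One combined Indonesian -> English mapping; single left-to-right scan,
--     # emitting the translation at the first key that matches at each position.
--     mapping = {
--         'Senin': 'Monday',
--         'Selasa': 'Tuesday',
--         'Rabu': 'Wednesday',
--         'Kamis': 'Thursday',
--         'Jumat': 'Friday',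
--         'Sabtu': 'Saturday',
--         'Minggu': 'Sunday',
--         'Januari': 'January',
--         'Februari': 'February',
--         'Maret': 'March',
--         'April': 'April',
--         'Mei': 'May',
--         'Juni': 'June',
--         'Juli': 'July',
--         'Agustus': 'August',
--         'September': 'September',
--         'Oktober': 'October',
--         'November': 'November',
--         'Desember': 'December',
--     }
--     out = []
--     i = 0
--     n = len(date_str)
--     while i < n:
--         for indo, eng in mapping.items():
--             if date_str.startswith(indo, i):
--                 out.append(eng)
--                 i += len(indo)
--                 break
--         else:
--             out.append(date_str[i])
--             i += 1
--     return ''.join(out)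
-- ===== Notes on version B (the rewrite author's own statement) =====
-- stated objective: alternative
-- what changed: Instead of 19 sequential full-string replace passes (7 days then 12 months), B merges both dicts into one mapping and makes a single left-to-right scan of the string, emitting the translation of the first key matching at each position; the outputs coincide because no key overlaps another key or a replacement value.
import Mathlib
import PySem

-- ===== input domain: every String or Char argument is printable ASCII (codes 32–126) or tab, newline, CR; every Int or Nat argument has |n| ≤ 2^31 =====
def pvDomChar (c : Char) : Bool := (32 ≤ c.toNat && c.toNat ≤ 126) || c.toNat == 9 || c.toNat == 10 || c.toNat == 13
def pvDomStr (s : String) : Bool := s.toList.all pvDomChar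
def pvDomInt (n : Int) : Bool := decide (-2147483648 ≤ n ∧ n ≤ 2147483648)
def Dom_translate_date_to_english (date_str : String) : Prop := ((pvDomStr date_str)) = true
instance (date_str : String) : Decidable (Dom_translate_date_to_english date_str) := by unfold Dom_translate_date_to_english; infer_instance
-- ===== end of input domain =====

-- B replaces A's 19 sequential full-string replace passes by ONE left-to-right scan over the
-- string with a combined day+month mapping (alternative decomposition, same return value).

-- ===== PORT A =====
def pvDays : PySem.Dict String String :=
  PySem.Dict.ofList [("Senin", "Monday"), ("Selasa", "Tuesday"), ("Rabu", "Wednesday"),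
    ("Kamis", "Thursday"), ("Jumat", "Friday"), ("Sabtu", "Saturday"), ("Minggu", "Sunday")]

def pvMonths : PySem.Dict String String :=
  PySem.Dict.ofList [("Januari", "January"), ("Februari", "February"), ("Maret", "March"),
    ("April", "April"), ("Mei", "May"), ("Juni", "June"), ("Juli", "July"),
    ("Agustus", "August"), ("September", "September"), ("Oktober", "October"),
    ("November", "November"), ("Desember", "December")]

def translate_date_to_english (date_str : String) : String :=
  let s1 := (PySem.Dict.items pvDays).foldl
    (fun s kv => PySem.Str.replace s kv.1 kv.2) date_str
  (PySem.Dict.items pvMonths).foldl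
    (fun s kv => PySem.Str.replace s kv.1 kv.2) s1

-- ===== PORT B =====
-- the combined mapping of Source B, as (indonesian, english) character lists
def pvPairs : List (List Char × List Char) :=
  [("Senin".toList, "Monday".toList), ("Selasa".toList, "Tuesday".toList),
   ("Rabu".toList, "Wednesday".toList), ("Kamis".toList, "Thursday".toList),
   ("Jumat".toList, "Friday".toList), ("Sabtu".toList, "Saturday".toList),
   ("Minggu".toList, "Sunday".toList), ("Januari".toList, "January".toList),
   ("Februari".toList, "February".toList), ("Maret".toList, "March".toList),
   ("April".toList, "April".toList), ("Mei".toList, "May".toList),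
   ("Juni".toList, "June".toList), ("Juli".toList, "July".toList),
   ("Agustus".toList, "August".toList), ("September".toList, "September".toList),
   ("Oktober".toList, "October".toList), ("November".toList, "November".toList),
   ("Desember".toList, "December".toList)]

-- does the (nonempty) key of kv match here?  (= date_str.startswith(indo, i) in Source B)
def pvHit (s : List Char) (kv : List Char × List Char) : Bool :=
  !kv.1.isEmpty && kv.1.isPrefixOf s

-- Source B's while-loop: at each position emit the translation of the first matching key,
-- else copy the character
def pvScan (ps : List (List Char × List Char)) : List Char → List Char
  | [] => []
  | c :: s' =>
    match h : ps.find? (pvHit (c :: s')) with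
    | some kv => kv.2 ++ pvScan ps ((c :: s').drop kv.1.length)
    | none => c :: pvScan ps s'
termination_by s => s.length
decreasing_by
  · have hp := List.find?_some h
    simp only [pvHit, Bool.and_eq_true, Bool.not_eq_true', List.isEmpty_eq_false_iff] at hp
    have : 1 ≤ kv.1.length := by
      cases hkv : kv.1 with
      | nil => exact absurd hkv hp.1
      | cons a l => simp
    simp only [List.length_drop, List.length_cons]
    omega
  · simp

def translate_date_to_english_alt (date_str : String) : String :=
  String.ofList (pvScan pvPairs date_str.toList)

-- ===== PRECONDITION & SPEC =====
def Spec_translate_date_to_english (date_str : String) (out : String) : Prop := out = translate_date_to_english_alt date_str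
instance (date_str : String) (out : String) : Decidable (Spec_translate_date_to_english date_str out) := by unfold Spec_translate_date_to_english; infer_instance

-- ===== CLAIM (what is proved, stated in full; the proofs are below) =====
def Claim_equal_translate_date_to_english : Prop := ∀ (date_str : String), Dom_translate_date_to_english date_str → Spec_translate_date_to_english date_str (translate_date_to_english date_str)

-- ===== LEMMAS AND PROOFS =====

-- `pvCompat a b`: one of the two lists is a prefix of the other (abbrev so that `decide` sees through)
abbrev pvCompat (a b : List Char) : Prop := a <+: b ∨ b <+: a

abbrev pvSafe (p p' : List Char × List Char) : Prop :=
  (∀ i, i < p.2.length → ¬ pvCompat (p.2.drop i) p'.1) ∧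
  (∀ i, i < p'.1.length → 1 ≤ i → ¬ pvCompat (p'.1.drop i) p.1) ∧
  (∀ j, j < p'.1.length → 1 ≤ j → p'.1[j]? ≠ p.2[0]?)

theorem pvGo_zero (k v : List Char) (l acc : List Char) :
    PySem.Chars.replace.go k v 0 l acc = acc.reverse ++ l := by
  simp [PySem.Chars.replace.go]

theorem pvGo_nil (k v : List Char) (f : Nat) (acc : List Char) :
    PySem.Chars.replace.go k v (f+1) [] acc = acc.reverse := by
  simp [PySem.Chars.replace.go]

theorem pvGo_pos (k v : List Char) (f : Nat) (c : Char) (t acc : List Char) (hp : k <+: (c :: t)) :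
    PySem.Chars.replace.go k v (f+1) (c :: t) acc
      = PySem.Chars.replace.go k v f ((c :: t).drop k.length) (v.reverse ++ acc) := by
  rw [PySem.Chars.replace.go]
  simp [List.isPrefixOf_iff_prefix, hp]

theorem pvGo_neg (k v : List Char) (f : Nat) (c : Char) (t acc : List Char) (hp : ¬ k <+: (c :: t)) :
    PySem.Chars.replace.go k v (f+1) (c :: t) acc = PySem.Chars.replace.go k v f t (c :: acc) := by
  rw [PySem.Chars.replace.go]
  simp [List.isPrefixOf_iff_prefix, hp]

theorem pvReplace_eq_go (k v s : List Char) (hk : k ≠ []) :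
    PySem.Chars.replace s k v = PySem.Chars.replace.go k v s.length s [] := by
  simp [PySem.Chars.replace, hk]

theorem pvKlen (k : List Char) (hk : k ≠ []) : 1 ≤ k.length := by
  cases k with
  | nil => exact absurd rfl hk
  | cons a l => simp

theorem pvGo_eq (k v : List Char) (hk : k ≠ []) :
    ∀ (fuel : Nat) (l acc : List Char), l.length ≤ fuel →
      PySem.Chars.replace.go k v fuel l acc = acc.reverse ++ PySem.Chars.replace l k v := by
  intro fuel
  induction fuel using Nat.strong_induction_on with
  | _ fuel ih =>
    intro l acc hle
    cases fuel with
    | zero =>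
      have hl : l = [] := List.length_eq_zero_iff.mp (Nat.le_zero.mp hle)
      subst hl
      rw [pvGo_zero, pvReplace_eq_go _ _ _ hk]
      simp [pvGo_zero]
    | succ f =>
      cases l with
      | nil =>
        rw [pvGo_nil, pvReplace_eq_go _ _ _ hk]
        simp [pvGo_zero]
      | cons c t =>
        have hk1 := pvKlen k hk
        simp only [List.length_cons] at hle
        by_cases hp : k <+: (c :: t)
        · rw [pvGo_pos _ _ _ _ _ _ hp]
          rw [ih f (by omega) _ _ (by simp [List.length_drop]; omega)]
          conv_rhs => rw [pvReplace_eq_go _ _ _ hk]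
          simp only [List.length_cons]
          conv_rhs => rw [pvGo_pos _ _ _ _ _ _ hp]
          rw [ih t.length (by omega) _ _ (by simp [List.length_drop]; omega)]
          simp
        · rw [pvGo_neg _ _ _ _ _ _ hp]
          rw [ih f (by omega) _ _ (by omega)]
          conv_rhs => rw [pvReplace_eq_go _ _ _ hk]
          simp only [List.length_cons]
          conv_rhs => rw [pvGo_neg _ _ _ _ _ _ hp]
          rw [ih t.length (by omega) _ _ le_rfl]
          simp

theorem pvReplace_nil (k v : List Char) (hk : k ≠ []) : PySem.Chars.replace [] k v = [] := by
  rw [pvReplace_eq_go _ _ _ hk]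
  simp [pvGo_zero]

theorem pvReplace_pos (k v s : List Char) (hk : k ≠ []) (h : k <+: s) :
    PySem.Chars.replace s k v = v ++ PySem.Chars.replace (s.drop k.length) k v := by
  have hk1 := pvKlen k hk
  cases s with
  | nil => exact absurd (List.prefix_nil.mp h) hk
  | cons c t =>
    rw [pvReplace_eq_go _ _ _ hk]
    simp only [List.length_cons]
    rw [pvGo_pos _ _ _ _ _ _ h]
    rw [pvGo_eq _ _ hk t.length _ _ (by simp [List.length_drop]; omega)]
    simp

theorem pvReplace_neg (k v : List Char) (c : Char) (t : List Char) (h : ¬ k <+: (c :: t)) :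
    PySem.Chars.replace (c :: t) k v = c :: PySem.Chars.replace t k v := by
  have hk : k ≠ [] := by
    intro hnil
    exact h (hnil ▸ List.nil_prefix)
  rw [pvReplace_eq_go _ _ _ hk]
  simp only [List.length_cons]
  rw [pvGo_neg _ _ _ _ _ _ h]
  rw [pvGo_eq _ _ hk t.length _ _ le_rfl]
  simp

theorem pvReplace_append (k v : List Char) :
    ∀ (q t : List Char), (∀ i, i < q.length → ¬ k <+: (q ++ t).drop i) →
      PySem.Chars.replace (q ++ t) k v = q ++ PySem.Chars.replace t k v := by
  intro q
  induction q with
  | nil => intro t _; simp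
  | cons c q' ih =>
    intro t hno
    have h0 : ¬ k <+: (c :: (q' ++ t)) := by
      have := hno 0 (by simp)
      simpa using this
    rw [List.cons_append, pvReplace_neg _ _ _ _ h0]
    rw [ih t (fun i hi => by
      have := hno (i+1) (by simp; omega)
      simpa using this)]
    simp

theorem pvPrefix_replace (k v : List Char) (hk : k ≠ []) (hv : v ≠ []) :
    ∀ (s q : List Char), (∀ j, 1 ≤ j → j < q.length → q[j]? ≠ v[0]?) →
      ¬ k <+: s → q <+: PySem.Chars.replace s k v → q <+: s := by
  intro s
  induction s with
  | nil =>
    intro q _ _ hq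
    rwa [pvReplace_nil _ _ hk] at hq
  | cons c t ih =>
    intro q hj hks hq
    rw [pvReplace_neg _ _ _ _ hks] at hq
    cases q with
    | nil => exact List.nil_prefix
    | cons a q1 =>
      rw [List.cons_prefix_cons] at hq
      obtain ⟨rfl, hq1⟩ := hq
      by_cases hkt : k <+: t
      · obtain ⟨t', rfl⟩ := hkt
        rw [pvReplace_pos _ _ _ hk (List.prefix_append _ _)] at hq1
        rw [List.drop_left] at hq1
        cases q1 with
        | nil => simp [List.cons_prefix_cons]
        | cons b q2 =>
          exfalso
          cases v with
          | nil => exact hv rfl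
          | cons v0 v' =>
            rw [List.cons_append, List.cons_prefix_cons] at hq1
            obtain ⟨rfl, _⟩ := hq1
            exact hj 1 le_rfl (by simp) (by simp)
      · have := ih q1 (fun j h1 h2 => by
          have := hj (j+1) (by omega) (by simp; omega)
          simpa using this) hkt hq1
        rw [List.cons_prefix_cons]
        exact ⟨rfl, this⟩

theorem pvScan_nil (ps : List (List Char × List Char)) : pvScan ps [] = [] := by
  rw [pvScan]

theorem pvScan_of_find?_eq_none (ps : List (List Char × List Char)) (c : Char) (s' : List Char)
    (h : ps.find? (pvHit (c :: s')) = none) : pvScan ps (c :: s') = c :: pvScan ps s' := by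
  rw [pvScan]
  split
  · next kv heq => rw [h] at heq; cases heq
  · rfl

theorem pvScan_of_find?_eq_some (ps : List (List Char × List Char)) (s : List Char)
    (hs : s ≠ []) (kv : List Char × List Char) (h : ps.find? (pvHit s) = some kv) :
    pvScan ps s = kv.2 ++ pvScan ps (s.drop kv.1.length) := by
  cases s with
  | nil => exact absurd rfl hs
  | cons c s' =>
    rw [pvScan]
    split
    · next kv' heq => rw [h] at heq; cases heq; rfl
    · next heq => rw [h] at heq; cases heq

theorem pvScan_nil_ps : ∀ (s : List Char), pvScan [] s = s := by
  intro s
  induction s with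
  | nil => exact pvScan_nil []
  | cons c s' ih =>
    rw [pvScan_of_find?_eq_none [] c s' rfl, ih]

theorem pvScan_append (ps : List (List Char × List Char)) :
    ∀ (v u : List Char), (∀ kv ∈ ps, ∀ i, i < v.length → ¬ pvCompat (v.drop i) kv.1) →
      pvScan ps (v ++ u) = v ++ pvScan ps u := by
  intro v
  induction v with
  | nil => intro u _; simp
  | cons c v' ih =>
    intro u hno
    have hfind : ps.find? (pvHit (c :: (v' ++ u))) = none := by
      apply List.find?_eq_none.mpr
      intro kv hm
      simp only [pvHit, Bool.and_eq_true, Bool.not_eq_true', List.isEmpty_eq_false_iff,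
        List.isPrefixOf_iff_prefix, not_and]
      intro _ hpref
      have hpc : kv.1 <+: (c :: v') ++ u := hpref
      have := List.prefix_or_prefix_of_prefix hpc (List.prefix_append (c :: v') u)
      exact hno kv hm 0 (by simp) (by simpa [pvCompat] using this.symm)
    rw [List.cons_append, pvScan_of_find?_eq_none _ _ _ hfind]
    rw [ih u (fun kv hm i hi => by
      have := hno kv hm (i+1) (by simp; omega)
      simpa using this)]
    simp

theorem pvStep (k v : List Char) (rest : List (List Char × List Char))
    (hk : k ≠ []) (hv : v ≠ [])
    (hrest : ∀ kv ∈ rest, pvSafe (k, v) kv)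
    (hpair : ∀ p ∈ rest, ∀ p' ∈ rest, pvCompat p.1 p'.1 → p.1 = p'.1) :
    ∀ (n : Nat) (s : List Char), s.length ≤ n →
      pvScan rest (PySem.Chars.replace s k v) = pvScan ((k, v) :: rest) s := by
  intro n
  induction n with
  | zero =>
    intro s hs
    have : s = [] := List.length_eq_zero_iff.mp (Nat.le_zero.mp hs)
    subst this
    rw [pvReplace_nil _ _ hk, pvScan_nil, pvScan_nil]
  | succ n ih =>
    intro s hs
    cases s with
    | nil => rw [pvReplace_nil _ _ hk, pvScan_nil, pvScan_nil]
    | cons c s' =>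
      have hk1 := pvKlen k hk
      simp only [List.length_cons] at hs
      by_cases hks : k <+: (c :: s')
      · obtain ⟨t, ht⟩ := hks
        rw [← ht]
        have hfind : ((k, v) :: rest).find? (pvHit (k ++ t)) = some (k, v) := by
          apply List.find?_cons_of_pos
          simp [pvHit, hk, List.isPrefixOf_iff_prefix, List.prefix_append]
        rw [pvReplace_pos _ _ _ hk (List.prefix_append k t), List.drop_left]
        rw [pvScan_append rest v _ (fun kv hm i hi => (hrest kv hm).1 i hi)]
        have hlt : t.length ≤ n := by
          have := congrArg List.length ht; simp at this; omega
        rw [ih t hlt]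
        rw [pvScan_of_find?_eq_some _ _ (by simp [hk]) _ hfind, List.drop_left]
      · cases hfq : rest.find? (pvHit (c :: s')) with
        | none =>
          have hfall : ((k, v) :: rest).find? (pvHit (c :: s')) = none := by
            rw [List.find?_cons_of_neg, hfq]
            simp [pvHit, List.isPrefixOf_iff_prefix, hks]
          rw [pvScan_of_find?_eq_none _ _ _ hfall]
          rw [pvReplace_neg _ _ _ _ hks]
          have hfnone2 : rest.find? (pvHit (c :: PySem.Chars.replace s' k v)) = none := by
            apply List.find?_eq_none.mpr
            intro kv hm
            intro hhit
            obtain ⟨hkvne, hpref⟩ : kv.1 ≠ [] ∧ kv.1 <+: c :: PySem.Chars.replace s' k v := by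
              simpa [pvHit, List.isPrefixOf_iff_prefix] using hhit
            have hrepl : kv.1 <+: PySem.Chars.replace (c :: s') k v := by
              rw [pvReplace_neg _ _ _ _ hks]; exact hpref
            have horig : kv.1 <+: (c :: s') :=
              pvPrefix_replace k v hk hv (c :: s') kv.1
                (fun j h1 h2 => (hrest kv hm).2.2 j h2 h1) hks hrepl
            have := List.find?_eq_none.mp hfq kv hm
            simp [pvHit, hkvne, List.isPrefixOf_iff_prefix, horig] at this
          rw [pvScan_of_find?_eq_none _ _ _ hfnone2]
          rw [ih s' (by omega)]
        | some qw =>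
          have hq := List.find?_some hfq
          simp only [pvHit, Bool.and_eq_true, Bool.not_eq_true', List.isEmpty_eq_false_iff,
            List.isPrefixOf_iff_prefix] at hq
          obtain ⟨hqne, hqpre⟩ := hq
          obtain ⟨t, ht⟩ := hqpre
          have hq1 := pvKlen qw.1 hqne
          have hfall : ((k, v) :: rest).find? (pvHit (c :: s')) = some qw := by
            rw [List.find?_cons_of_neg, hfq]
            simp [pvHit, List.isPrefixOf_iff_prefix, hks]
          rw [pvScan_of_find?_eq_some _ _ (by simp) _ hfall]
          rw [← ht]
          have hnomatch : ∀ i, i < qw.1.length → ¬ k <+: (qw.1 ++ t).drop i := by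
            intro i hi hpref
            cases Nat.eq_zero_or_pos i with
            | inl h0 =>
              subst h0
              simp only [List.drop_zero] at hpref
              rw [ht] at hpref
              exact hks hpref
            | inr h1 =>
              rw [List.drop_append_of_le_length (le_of_lt hi)] at hpref
              have := List.prefix_or_prefix_of_prefix hpref (List.prefix_append _ t)
              exact (hrest qw (List.mem_of_find?_eq_some hfq)).2.1 i hi h1
                (by simpa [pvCompat] using this.symm)
          rw [pvReplace_append k v qw.1 t hnomatch]
          obtain ⟨hpq, as, bs, hrest_eq, has⟩ := List.find?_eq_some_iff_append.mp hfq
          have hfind3 : rest.find? (pvHit (qw.1 ++ PySem.Chars.replace t k v)) = some qw := by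
            rw [hrest_eq]
            apply List.find?_eq_some_iff_append.mpr
            refine ⟨by simp [pvHit, hqne, List.isPrefixOf_iff_prefix, List.prefix_append],
              as, bs, rfl, ?_⟩
            intro p hp
            have hnot : ¬ (pvHit (qw.1 ++ PySem.Chars.replace t k v) p = true) := by
              intro hhit
              obtain ⟨hpne, hppre⟩ : p.1 ≠ [] ∧ p.1 <+: qw.1 ++ PySem.Chars.replace t k v := by
                simpa [pvHit, List.isPrefixOf_iff_prefix] using hhit
              have hmemp : p ∈ rest := by rw [hrest_eq]; exact List.mem_append_left _ hp
              have hcomp : pvCompat p.1 qw.1 := by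
                have := List.prefix_or_prefix_of_prefix hppre (List.prefix_append qw.1 _)
                simpa [pvCompat] using this
              have heq := hpair p hmemp qw (List.mem_of_find?_eq_some hfq) hcomp
              have hporig : p.1 <+: (c :: s') := by
                rw [heq, ← ht]; exact List.prefix_append _ _
              have hhit2 : pvHit (c :: s') p = true := by
                simp [pvHit, hpne, List.isPrefixOf_iff_prefix, hporig]
              have := has p hp
              simp [hhit2] at this
            simpa using hnot
          rw [pvScan_of_find?_eq_some _ _ (by simp [hqne]) _ hfind3, List.drop_left, List.drop_left]
          have hlt : t.length ≤ n := by
            have := congrArg List.length ht; simp at this; omega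
          rw [ih t hlt]

theorem pvChain : ∀ (ps : List (List Char × List Char)),
    (∀ kv ∈ ps, kv.1 ≠ [] ∧ kv.2 ≠ []) →
    List.Pairwise pvSafe ps →
    (∀ p ∈ ps, ∀ p' ∈ ps, pvCompat p.1 p'.1 → p.1 = p'.1) →
    ∀ (s : List Char),
      ps.foldl (fun acc kv => PySem.Chars.replace acc kv.1 kv.2) s = pvScan ps s := by
  intro ps
  induction ps with
  | nil => intro _ _ _ s; simp [pvScan_nil_ps]
  | cons p rest ih =>
    intro h1 h2 h3 s
    obtain ⟨k, v⟩ := p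
    rw [List.foldl_cons]
    rw [ih (fun kv hm => h1 kv (List.mem_cons_of_mem _ hm))
        (List.Pairwise.of_cons h2)
        (fun p hp p' hp' => h3 p (List.mem_cons_of_mem _ hp) p' (List.mem_cons_of_mem _ hp'))
        (PySem.Chars.replace s k v)]
    exact pvStep k v rest (h1 _ (List.mem_cons_self)).1 (h1 _ (List.mem_cons_self)).2
      (fun kv hm => List.rel_of_pairwise_cons h2 hm)
      (fun p hp p' hp' => h3 p (List.mem_cons_of_mem _ hp) p' (List.mem_cons_of_mem _ hp'))
      s.length s le_rfl

theorem pvPairs_ne : ∀ kv ∈ pvPairs, kv.1 ≠ [] ∧ kv.2 ≠ [] := by decide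

theorem pvPairs_safe : List.Pairwise pvSafe pvPairs := by decide

theorem pvPairs_incomp : ∀ p ∈ pvPairs, ∀ p' ∈ pvPairs, pvCompat p.1 p'.1 → p.1 = p'.1 := by decide

theorem pvFoldl_toList (l : List (String × String)) :
    ∀ (s : String),
      (l.foldl (fun a kv => PySem.Str.replace a kv.1 kv.2) s).toList =
        (l.map (fun kv => (kv.1.toList, kv.2.toList))).foldl
          (fun a kv => PySem.Chars.replace a kv.1 kv.2) s.toList := by
  induction l with
  | nil => intro s; simp
  | cons p l ih =>
    intro s
    rw [List.foldl_cons, List.map_cons, List.foldl_cons, ih, PySem.Str.toList_replace]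


theorem pvA_toList (date_str : String) :
    (translate_date_to_english date_str).toList = pvScan pvPairs date_str.toList := by
  have hsplit : translate_date_to_english date_str
      = (PySem.Dict.items pvDays ++ PySem.Dict.items pvMonths).foldl
          (fun s kv => PySem.Str.replace s kv.1 kv.2) date_str := by
    rw [List.foldl_append]
    rfl
  rw [hsplit, pvFoldl_toList]
  have hpairs : (PySem.Dict.items pvDays ++ PySem.Dict.items pvMonths).map
      (fun kv => (kv.1.toList, kv.2.toList)) = pvPairs := by decide
  rw [hpairs]
  exact pvChain pvPairs pvPairs_ne pvPairs_safe pvPairs_incomp date_str.toList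

-- ===== VERDICT (by name: the statement is the Claim_ definition above) =====
theorem translate_date_to_english_spec : Claim_equal_translate_date_to_english := by
  intro date_str _
  unfold Spec_translate_date_to_english translate_date_to_english_alt
  have h := pvA_toList date_str
  calc translate_date_to_english date_str
      = String.ofList (translate_date_to_english date_str).toList := by simp
    _ = String.ofList (pvScan pvPairs date_str.toList) := by rw [h]
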